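-- pv_equiv track=rewrite | github.com/ver228/Work_In_Progress | nn_tests/egg_laying/get_wrong_events.py | createBlocks
-- ===== SOURCE A (Python) =====
-- def createBlocks(flags_vector, min_block_size=0):
--     # divide data into groups of continous indexes
--     prev_ind = False
--     group_ini = []
--     group_fin = []
--     for ii, flag_ind in enumerate(flags_vector):
--
--         if not prev_ind and flag_ind:
--             group_ini.append(ii)
--         if prev_ind and not flag_ind:
--             # substract one size this is the condition one after the end of the
--             # block
--             group_fin.append(ii - 1)
--         prev_ind = flag_ind
--     # append the last index if the group ended in the last index
--     if len(group_ini) - len(group_fin) == 1: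
--         group_fin.append(ii)
--     assert len(group_ini) == len(group_fin)
--
--     # change this into a single list of tuples
--     groups = list(zip(group_ini, group_fin))
--
--     # remove any group smaller than the min_block_size
--     groups = [gg for gg in groups if gg[1] - gg[0] >= min_block_size]
--     return groups
-- ===== SOURCE B (Python) =====
-- def createBlocks(flags_vector, min_block_size=0):
--     # single pass: count the length of the current run of truthy flags;
--     # close it (and filter by size) as soon as a falsy flag ends it
--     groups = []
--     run = 0
--     for i, f in enumerate(flags_vector):
--         if f:
--             run += 1
--         else:
--             if run > 0 and run - 1 >= min_block_size:
--                 groups.append((i - run, i - 1))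
--             run = 0
--     n = len(flags_vector)
--     if run > 0 and run - 1 >= min_block_size:
--         groups.append((n - run, n - 1))
--     return groups
-- ===== Notes on version B (the rewrite author's own statement) =====
-- stated objective: simpler
-- what changed: Replaced A's prev-flag state machine building two parallel start/end index lists joined by zip, an end-of-loop length fixup and a final filter pass with a single-pass run-length counter that emits each sufficiently long block the moment its run of truthy flags closes.
import Mathlib
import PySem

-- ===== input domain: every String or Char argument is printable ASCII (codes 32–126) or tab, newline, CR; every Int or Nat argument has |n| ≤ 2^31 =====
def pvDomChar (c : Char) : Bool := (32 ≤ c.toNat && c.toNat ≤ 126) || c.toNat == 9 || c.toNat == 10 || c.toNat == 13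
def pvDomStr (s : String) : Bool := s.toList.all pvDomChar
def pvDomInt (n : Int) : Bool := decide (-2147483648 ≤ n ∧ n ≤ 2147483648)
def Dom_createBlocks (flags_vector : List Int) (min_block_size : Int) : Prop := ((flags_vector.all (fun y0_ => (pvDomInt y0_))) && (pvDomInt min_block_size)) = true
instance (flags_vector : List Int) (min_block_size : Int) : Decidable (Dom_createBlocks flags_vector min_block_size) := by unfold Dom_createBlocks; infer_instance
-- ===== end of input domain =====

-- B replaces A's prev-flag state machine with two parallel index lists, zip and a final
-- filter pass by one single-pass run-length counter that emits each filtered block as the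
-- run closes (objective: simpler — one accumulator list, no zip, no end-of-loop length fixup).

-- ===== PORT A =====
-- state: (prev_ind, group_ini, group_fin); prev_ind holds the last flag (0 = falsy start).
def createBlocks (flags_vector : List Int) (min_block_size : Int) : List (Int × Int) :=
  let st := (PySem.List.enumerate flags_vector).foldl
    (fun (s : Int × List Int × List Int) (p : Int × Int) =>
      let ini := if s.1 = 0 ∧ p.2 ≠ 0 then s.2.1 ++ [p.1] else s.2.1
      let fin := if s.1 ≠ 0 ∧ p.2 = 0 then s.2.2 ++ [p.1 - 1] else s.2.2
      (p.2, ini, fin))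
    (0, [], [])
  -- `ii` after the loop is the last index, i.e. len - 1 (the branch is only reachable then)
  let fin := if (st.2.1.length : Int) - (st.2.2.length : Int) = 1
             then st.2.2 ++ [(flags_vector.length : Int) - 1] else st.2.2
  (st.2.1.zip fin).filter (fun g => g.2 - g.1 ≥ min_block_size)

-- ===== PORT B =====
-- state: (groups, run); `run` is the length of the current run of truthy flags.
def createBlocks_alt (flags_vector : List Int) (min_block_size : Int) : List (Int × Int) :=
  let st := (PySem.List.enumerate flags_vector).foldl
    (fun (s : List (Int × Int) × Int) (p : Int × Int) =>
      if p.2 ≠ 0 then (s.1, s.2 + 1)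
      else (if 0 < s.2 ∧ s.2 - 1 ≥ min_block_size
            then s.1 ++ [(p.1 - s.2, p.1 - 1)] else s.1, 0))
    ([], 0)
  if 0 < st.2 ∧ st.2 - 1 ≥ min_block_size
  then st.1 ++ [((flags_vector.length : Int) - st.2, (flags_vector.length : Int) - 1)]
  else st.1

-- ===== PRECONDITION & SPEC =====
def Spec_createBlocks (flags_vector : List Int) (min_block_size : Int) (out : List (Int × Int)) : Prop := out = createBlocks_alt flags_vector min_block_size
instance (flags_vector : List Int) (min_block_size : Int) (out : List (Int × Int)) : Decidable (Spec_createBlocks flags_vector min_block_size out) := by unfold Spec_createBlocks; infer_instance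

-- ===== CLAIM (what is proved, stated in full; the proofs are below) =====
def Claim_equal_createBlocks : Prop := ∀ (flags_vector : List Int) (min_block_size : Int), Dom_createBlocks flags_vector min_block_size → Spec_createBlocks flags_vector min_block_size (createBlocks flags_vector min_block_size)

-- ===== LEMMAS AND PROOFS =====

-- zip of the two projection lists of a pair list gives the list back
theorem pvZipFstSnd (l : List (Int × Int)) :
    (l.map Prod.fst).zip (l.map Prod.snd) = l := by
  induction l with
  | nil => rfl
  | cons x xs ih => simp [ih]

-- Invariant: after processing a prefix, A's state is (prev, pairs.map fst ++ open, pairs.map snd)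
-- where `pairs` are the completed blocks, `open = [s - run]` iff a run of length `run` is open,
-- and B's state is (pairs filtered by size, run).
theorem createBlocks_key (m : Int) : ∀ (fv : List Int) (s prev run : Int)
    (pairs : List (Int × Int)), 0 ≤ run → (prev ≠ 0 ↔ 0 < run) →
    (let a := (PySem.List.enumerate fv s).foldl
      (fun (st : Int × List Int × List Int) (p : Int × Int) =>
        let ini := if st.1 = 0 ∧ p.2 ≠ 0 then st.2.1 ++ [p.1] else st.2.1
        let fin := if st.1 ≠ 0 ∧ p.2 = 0 then st.2.2 ++ [p.1 - 1] else st.2.2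
        (p.2, ini, fin))
      (prev, pairs.map Prod.fst ++ (if 0 < run then [s - run] else []), pairs.map Prod.snd);
     let fin2 := if (a.2.1.length : Int) - (a.2.2.length : Int) = 1
                 then a.2.2 ++ [s + (fv.length : Int) - 1] else a.2.2;
     (a.2.1.zip fin2).filter (fun g => g.2 - g.1 ≥ m))
    =
    (let b := (PySem.List.enumerate fv s).foldl
      (fun (st : List (Int × Int) × Int) (p : Int × Int) =>
        if p.2 ≠ 0 then (st.1, st.2 + 1)
        else (if 0 < st.2 ∧ st.2 - 1 ≥ m
              then st.1 ++ [(p.1 - st.2, p.1 - 1)] else st.1, 0))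
      (pairs.filter (fun g => g.2 - g.1 ≥ m), run);
     if 0 < b.2 ∧ b.2 - 1 ≥ m
     then b.1 ++ [(s + (fv.length : Int) - b.2, s + (fv.length : Int) - 1)] else b.1) := by
  intro fv
  induction fv with
  | nil =>
    intro s prev run pairs hr hpr
    simp only [PySem.List.enumerate_nil, List.foldl_nil, List.length_nil, Nat.cast_zero,
      add_zero]
    by_cases h : 0 < run
    · rw [if_pos h]
      have hlen : (((pairs.map Prod.fst ++ [s - run]).length : Int)
          - ((pairs.map Prod.snd).length : Int)) = 1 := by simp
      rw [if_pos hlen, List.zip_append (by simp), pvZipFstSnd, List.filter_append]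
      have h1 : s - 1 - (s - run) = run - 1 := by ring
      by_cases hm : run - 1 ≥ m
      · rw [if_pos ⟨h, hm⟩]; simp [h1, hm]
      · rw [if_neg (fun hc => hm hc.2)]; simp [h1, hm]
    · rw [if_neg h]
      have hlen : ¬ ((((pairs.map Prod.fst ++ ([] : List Int)).length : Int)
          - ((pairs.map Prod.snd).length : Int)) = 1) := by simp
      rw [if_neg hlen]
      simp [h, pvZipFstSnd]
  | cons f rest ih =>
    intro s prev run pairs hr hpr
    rw [PySem.List.enumerate_cons]
    simp only [List.foldl_cons, List.length_cons, Nat.cast_add, Nat.cast_one]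
    have ecast : ∀ x : Int, s + ((rest.length : Int) + 1) - x
        = (s + 1) + (rest.length : Int) - x := fun x => by ring
    simp only [ecast]
    by_cases hf : f ≠ 0
    · rw [if_pos hf]
      have e2 : (if prev ≠ 0 ∧ f = 0 then pairs.map Prod.snd ++ [s - 1]
          else pairs.map Prod.snd) = pairs.map Prod.snd := by
        rw [if_neg (fun hc => hf hc.2)]
      by_cases h : 0 < run
      · -- run continues
        have hprev : prev ≠ 0 := hpr.mpr h
        have e1 : (if prev = 0 ∧ f ≠ 0 then
            (pairs.map Prod.fst ++ (if 0 < run then [s - run] else [])) ++ [s]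
            else pairs.map Prod.fst ++ (if 0 < run then [s - run] else []))
            = pairs.map Prod.fst ++ (if 0 < run + 1 then [(s + 1) - (run + 1)] else []) := by
          rw [if_neg (fun hc => hprev hc.1), if_pos h,
            if_pos (by omega : (0:Int) < run + 1)]
          have : s - run = (s + 1) - (run + 1) := by ring
          rw [this]
        rw [e1, e2]
        exact ih (s + 1) f (run + 1) pairs (by omega)
          ⟨fun _ => by omega, fun _ => hf⟩
      · -- run starts
        have hrun0 : run = 0 := by omega
        have hprev : prev = 0 := by by_contra hp; exact h (hpr.mp hp)
        subst hrun0; subst hprev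
        have e1 : (if (0:Int) = 0 ∧ f ≠ 0 then
            (pairs.map Prod.fst ++ (if (0:Int) < 0 then [s - 0] else [])) ++ [s]
            else pairs.map Prod.fst ++ (if (0:Int) < 0 then [s - 0] else []))
            = pairs.map Prod.fst ++ (if (0:Int) < 0 + 1 then [(s + 1) - (0 + 1)] else []) := by
          rw [if_pos ⟨rfl, hf⟩]
          simp
        rw [e1, e2]
        exact ih (s + 1) f (0 + 1) pairs (by omega)
          ⟨fun _ => by omega, fun _ => hf⟩
    · -- f = 0
      have hf0 : f = 0 := by omega
      subst hf0
      rw [if_neg (by simp : ¬ ((0:Int) ≠ 0))]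
      by_cases h : 0 < run
      · -- run closes
        have hprev : prev ≠ 0 := hpr.mpr h
        have e1 : (if prev = 0 ∧ (0:Int) ≠ 0 then
            (pairs.map Prod.fst ++ (if 0 < run then [s - run] else [])) ++ [s]
            else pairs.map Prod.fst ++ (if 0 < run then [s - run] else []))
            = (pairs ++ [(s - run, s - 1)]).map Prod.fst
              ++ (if (0:Int) < 0 then [(s + 1) - 0] else []) := by
          rw [if_neg (by simp)]
          simp [h]
        have e2 : (if prev ≠ 0 ∧ (0:Int) = 0 then pairs.map Prod.snd ++ [s - 1]
            else pairs.map Prod.snd)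
            = (pairs ++ [(s - run, s - 1)]).map Prod.snd := by
          rw [if_pos ⟨hprev, rfl⟩]
          simp
        have e3 : (if 0 < run ∧ run - 1 ≥ m
            then pairs.filter (fun g => g.2 - g.1 ≥ m) ++ [(s - run, s - 1)]
            else pairs.filter (fun g => g.2 - g.1 ≥ m))
            = (pairs ++ [(s - run, s - 1)]).filter (fun g => g.2 - g.1 ≥ m) := by
          have h1 : s - 1 - (s - run) = run - 1 := by ring
          by_cases hm : run - 1 ≥ m
          · rw [if_pos ⟨h, hm⟩]; simp [List.filter_append, h1, hm]
          · rw [if_neg (fun hc => hm hc.2)]; simp [List.filter_append, h1, hm]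
        rw [e1, e2, e3]
        exact ih (s + 1) 0 0 (pairs ++ [(s - run, s - 1)]) le_rfl (by simp)
      · -- run stays closed
        have hrun0 : run = 0 := by omega
        have hprev : prev = 0 := by by_contra hp; exact h (hpr.mp hp)
        subst hrun0; subst hprev
        have e1 : (if (0:Int) = 0 ∧ (0:Int) ≠ 0 then
            (pairs.map Prod.fst ++ (if (0:Int) < 0 then [s - 0] else [])) ++ [s]
            else pairs.map Prod.fst ++ (if (0:Int) < 0 then [s - 0] else []))
            = pairs.map Prod.fst ++ (if (0:Int) < 0 then [(s + 1) - 0] else []) := by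
          simp
        have e2 : (if (0:Int) ≠ 0 ∧ (0:Int) = 0 then pairs.map Prod.snd ++ [s - 1]
            else pairs.map Prod.snd) = pairs.map Prod.snd := by
          simp
        have e3 : (if (0:Int) < 0 ∧ (0:Int) - 1 ≥ m
            then pairs.filter (fun g => g.2 - g.1 ≥ m) ++ [(s - 0, s - 1)]
            else pairs.filter (fun g => g.2 - g.1 ≥ m))
            = pairs.filter (fun g => g.2 - g.1 ≥ m) := by
          simp
        rw [e1, e2, e3]
        exact ih (s + 1) 0 0 pairs le_rfl (by simp)

-- ===== VERDICT (by name: the statement is the Claim_ definition above) =====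
theorem createBlocks_spec : Claim_equal_createBlocks := by
  intro fv m _
  unfold Spec_createBlocks createBlocks createBlocks_alt
  have := createBlocks_key m fv 0 0 0 [] le_rfl (by simp)
  simpa using this
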